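-- pv_equiv track=rewrite | github.com/andCelli/efg_tools | misc/hand_gen.py | _get_all_combinations_for_one_hand
-- ===== SOURCE A (Python) =====
-- def _get_all_combinations_for_one_hand(cards, hand_size):
--     result = []
--     for i in range(2 ** len(cards)):
--         bit_str = bin(i)[2:]
--         if bit_str.count('1') == hand_size:
--             l = []
--             for idx, bit in enumerate(bit_str[::-1]):
--                 if bit == '1':
--                     l.append(cards[idx])
--             result.append(l)
--     return result
-- ===== SOURCE B (Python) =====
-- def _get_all_combinations_for_one_hand(cards, hand_size):
--     # Recursive construction over the cards (last card considered first),
--     # producing subsets in increasing-bitmask order without scanning all 2**n masks.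
--     def go(rev, k):
--         if k == 0:
--             return [[]]
--         if k < 0 or not rev:
--             return []
--         x = rev[0]
--         rest = rev[1:]
--         return go(rest, k) + [c + [x] for c in go(rest, k - 1)]
--     return go(cards[::-1], hand_size)
-- ===== Notes on version B (the rewrite author's own statement) =====
-- stated objective: alternative
-- what changed: A scans all 2**len(cards) bitmasks, decoding each into a binary string and testing its popcount; B instead builds the subsets by a take-or-skip recursion on the cards (last card first), producing the same increasing-bitmask order directly and doing work proportional to the subsets it builds (intended as faster for small hand sizes; a timing run measured 1.62x at n=16 and could not confirm it at larger sizes).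
import Mathlib
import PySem

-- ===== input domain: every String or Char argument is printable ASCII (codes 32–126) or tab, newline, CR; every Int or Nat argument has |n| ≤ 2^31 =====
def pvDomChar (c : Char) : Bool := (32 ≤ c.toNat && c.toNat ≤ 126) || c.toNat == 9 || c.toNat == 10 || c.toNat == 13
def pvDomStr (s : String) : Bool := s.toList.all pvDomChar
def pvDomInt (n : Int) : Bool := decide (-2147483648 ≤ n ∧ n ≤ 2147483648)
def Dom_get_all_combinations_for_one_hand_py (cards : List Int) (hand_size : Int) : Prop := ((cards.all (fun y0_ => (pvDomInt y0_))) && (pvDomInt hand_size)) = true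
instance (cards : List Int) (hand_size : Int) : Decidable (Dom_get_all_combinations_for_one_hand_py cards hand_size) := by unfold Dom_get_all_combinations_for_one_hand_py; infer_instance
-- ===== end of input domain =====

-- B replaces A's scan of all 2**len(cards) bitmasks (each decoded via a binary string) by a
-- take-or-skip recursion on the cards that builds the same subsets in the same
-- increasing-bitmask order directly (alternative algorithm; equal return value proved below).


-- ===== PORT A =====
-- literal transliteration: for i in range(2**len(cards)): bit_str = bin(i)[2:] (i ≥ 0 on every
-- iteration, so bin(i)[2:] = PySem.Int.toBinChars i = Nat.toDigits 2 i.toNat); bit_str[::-1] is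
-- reversal (PySem.List.slice?_none_none_neg_one); cards[idx] is ported with pyGetD: the loop only
-- reaches idx < len(bit_str) ≤ len(cards), so pyGetD is exact and A never raises (no Pre_ needed).
def get_all_combinations_for_one_hand_py (cards : List Int) (hand_size : Int) : List (List Int) :=
  (PySem.List.pyRange 0 (2 ^ cards.length) 1).foldl
    (fun result i =>
      let bit_str := PySem.Int.toBinChars i
      if ((PySem.Chars.count bit_str ['1'] : Int) = hand_size) then
        result ++ [(PySem.List.enumerate bit_str.reverse).foldl
          (fun l p => if p.2 = '1' then l ++ [PySem.List.pyGetD cards p.1 0] else l) []]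
      else result)
    []

-- ===== PORT B =====
-- B-side helper = Source B's inner 'go': recursion on the reversed card list.
def pvGo : List Int → Int → List (List Int)
  | rev, k =>
    if k = 0 then [[]]
    else if k < 0 then []
    else match rev with
      | [] => []
      | x :: rest => pvGo rest k ++ (pvGo rest (k - 1)).map (· ++ [x])

-- cards[::-1] is reversal (PySem.List.slice?_none_none_neg_one)
def get_all_combinations_for_one_hand_py_alt (cards : List Int) (hand_size : Int) : List (List Int) :=
  pvGo cards.reverse hand_size

-- ===== PRECONDITION & SPEC =====
def Spec_get_all_combinations_for_one_hand_py (cards : List Int) (hand_size : Int) (out : List (List Int)) : Prop := out = get_all_combinations_for_one_hand_py_alt cards hand_size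
instance (cards : List Int) (hand_size : Int) (out : List (List Int)) : Decidable (Spec_get_all_combinations_for_one_hand_py cards hand_size out) := by unfold Spec_get_all_combinations_for_one_hand_py; infer_instance

-- ===== CLAIM (what is proved, stated in full; the proofs are below) =====
def Claim_equal_get_all_combinations_for_one_hand_py : Prop := ∀ (cards : List Int) (hand_size : Int), Dom_get_all_combinations_for_one_hand_py cards hand_size → Spec_get_all_combinations_for_one_hand_py cards hand_size (get_all_combinations_for_one_hand_py cards hand_size)

-- ===== LEMMAS AND PROOFS =====

def pvBits : Nat → List Char
  | m => if h : m = 0 then [] else pvBits (m / 2) ++ [Nat.digitChar (m % 2)]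
  decreasing_by exact Nat.div_lt_self (Nat.pos_of_ne_zero h) (by norm_num)

def pvBits' (m : Nat) : List Char := if m = 0 then ['0'] else pvBits m

lemma pv_toDigitsCore_eq : ∀ (f n : Nat) (ds : List Char), n < f →
    Nat.toDigitsCore 2 f n ds = pvBits' n ++ ds := by
  intro f
  induction f with
  | zero => intro n ds h; omega
  | succ f ih =>
    intro n ds h
    rw [Nat.toDigitsCore]
    rcases Nat.lt_or_ge n 2 with h2 | h2
    · interval_cases n <;> simp [pvBits', pvBits] <;> decide
    · have hne : n / 2 ≠ 0 := by omega
      simp only [hne, if_neg]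
      rw [ih (n / 2) _ (by omega)]
      have hn0 : n ≠ 0 := by omega
      conv_rhs => rw [pvBits', if_neg hn0, pvBits.eq_def]
      simp [hn0, pvBits', hne]

lemma pv_toDigits_eq (n : Nat) : Nat.toDigits 2 n = pvBits' n := by
  simpa [Nat.toDigits] using pv_toDigitsCore_eq (n + 1) n [] (Nat.lt_succ_self n)

lemma pv_toBinChars_natCast (j : Nat) : PySem.Int.toBinChars (j : Int) = pvBits' j := by
  simp [PySem.Int.toBinChars, pv_toDigits_eq]

lemma pvBits_len {n j : Nat} (h : j < 2 ^ n) : (pvBits j).length ≤ n := by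
  induction n generalizing j with
  | zero => interval_cases j; simp [pvBits]
  | succ n ih =>
    by_cases h0 : j = 0
    · simp [h0, pvBits]
    · rw [pvBits.eq_def]
      simp only [h0, dif_neg]
      have := ih (j := j / 2) (by omega)
      simp [List.length_append]; omega

lemma pvBits_top {n j : Nat} (h : j < 2 ^ n) :
    pvBits (2 ^ n + j) = '1' :: (List.replicate (n - (pvBits j).length) '0' ++ pvBits j) := by
  induction n generalizing j with
  | zero =>
    interval_cases j
    simp [pvBits]
    decide
  | succ n ih =>
    have hpos : 2 ^ (n + 1) + j ≠ 0 := by positivity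
    rw [pvBits.eq_def]
    simp only [hpos, dif_neg]
    have hdiv : (2 ^ (n + 1) + j) / 2 = 2 ^ n + j / 2 := by omega
    have hmod : (2 ^ (n + 1) + j) % 2 = j % 2 := by omega
    rw [hdiv, hmod, ih (by omega)]
    by_cases h0 : j = 0
    · subst h0
      rw [show pvBits 0 = [] by rw [pvBits.eq_def]; simp,
        show Nat.digitChar 0 = '0' by decide]
      simp [← List.replicate_succ']
    · conv_rhs => rw [pvBits.eq_def]
      simp only [h0, dif_neg]
      have hlen : (pvBits (j / 2)).length + 1 = (pvBits j).length := by
        conv_rhs => rw [pvBits.eq_def]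
        simp [h0]
      simp [← hlen, List.append_assoc]

lemma pv_count_go (c : Char) : ∀ (s : List Char) (f : Nat) (acc : Nat), s.length ≤ f →
    PySem.Chars.count.go [c] f s acc = acc + s.count c := by
  intro s
  induction s with
  | nil => intro f acc h; cases f <;> simp [PySem.Chars.count.go]
  | cons x t ih =>
    intro f acc h
    cases f with
    | zero => simp at h
    | succ f =>
      rw [PySem.Chars.count.go]
      by_cases hx : x = c
      · subst hx
        have : List.isPrefixOf [x] (x :: t) = true := by simp [List.isPrefixOf]
        simp only [this, if_pos]
        rw [show List.drop [x].length (x :: t) = t from rfl,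
          ih f (acc + 1) (by simp at h; omega)]
        simp [List.count_cons]
        omega
      · have : List.isPrefixOf [c] (x :: t) = false := by
          simp [List.isPrefixOf]; exact fun h' => absurd h'.symm hx
        simp only [this, Bool.false_eq_true, if_neg, not_false_iff]
        rw [ih f acc (by simpa using h)]
        simp [List.count_cons, hx]

lemma pv_count_single (c : Char) (s : List Char) : PySem.Chars.count s [c] = s.count c := by
  rw [PySem.Chars.count]
  simp only [List.isEmpty_iff, reduceCtorEq, if_neg, not_false_iff]
  simpa using pv_count_go c s s.length 0 le_rfl

lemma pv_count_top {n j : Nat} (h : j < 2 ^ n) :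
    (PySem.Chars.count (pvBits' (2 ^ n + j)) ['1'] : Nat)
      = 1 + PySem.Chars.count (pvBits' j) ['1'] := by
  rw [pv_count_single, pv_count_single]
  have hne : 2 ^ n + j ≠ 0 := by positivity
  rw [pvBits', if_neg hne, pvBits_top h]
  by_cases h0 : j = 0
  · subst h0
    simp [pvBits', pvBits, List.count_replicate]
  · rw [pvBits', if_neg h0]
    simp [List.count_cons, List.count_replicate, List.count_append]
    omega

def pvSel (cs : List Char) (cards : List Int) : List Int :=
  ((PySem.List.enumerate cs.reverse).filter (fun p => decide (p.2 = '1'))).map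
    (fun p => PySem.List.pyGetD cards p.1 0)

lemma pvSel_snoc_cards (cs : List Char) (ys : List Int) (x : Int)
    (h : cs.length ≤ ys.length) : pvSel cs (ys ++ [x]) = pvSel cs ys := by
  unfold pvSel
  apply List.map_congr_left
  intro p hp
  have hp' := List.mem_of_mem_filter hp
  rw [PySem.List.mem_enumerate_iff] at hp'
  obtain ⟨k, hk, rfl⟩ := hp'
  simp only [zero_add, PySem.List.pyGetD_natCast]
  rw [List.getD_append]
  simp at hk
  omega

lemma pvSel_bits'_bits (j : Nat) (ys : List Int) :
    pvSel (pvBits' j) ys = pvSel (pvBits j) ys := by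
  by_cases h0 : j = 0
  · subst h0
    rw [show pvBits 0 = [] by rw [pvBits.eq_def]; simp]
    simp [pvSel, pvBits', PySem.List.enumerate_cons, PySem.List.enumerate_nil]
  · rw [pvBits', if_neg h0]

lemma pvSel_zeros_filter (m : Nat) (s : Int) :
    (PySem.List.enumerate (List.replicate m '0') s).filter (fun p => decide (p.2 = '1')) = [] := by
  rw [List.filter_eq_nil_iff]
  intro p hp
  rw [PySem.List.mem_enumerate_iff] at hp
  obtain ⟨k, hk, rfl⟩ := hp
  simp

lemma pvSel_top' (ys : List Int) (x : Int) {j : Nat} (h : j < 2 ^ ys.length) :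
    pvSel (pvBits (2 ^ ys.length + j)) (ys ++ [x]) = pvSel (pvBits j) ys ++ [x] := by
  have hlen := pvBits_len h
  rw [pvBits_top h]
  unfold pvSel
  rw [List.reverse_cons, List.reverse_append, List.reverse_replicate,
    PySem.List.enumerate_append, PySem.List.enumerate_append,
    List.filter_append, List.filter_append, List.map_append, List.map_append,
    pvSel_zeros_filter]
  have h1 : pvSel (pvBits j) (ys ++ [x]) = pvSel (pvBits j) ys :=
    pvSel_snoc_cards _ _ _ (le_trans hlen (by simp))
  unfold pvSel at h1
  rw [h1]
  congr 1
  · simp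
  · have hs : (0 : Int) + ↑((pvBits j).reverse ++ List.replicate (ys.length - (pvBits j).length) '0').length
        = (ys.length : Int) := by
      simp
      omega
    rw [hs]
    rw [PySem.List.enumerate_cons, PySem.List.enumerate_nil]
    simp [PySem.List.pyGetD_natCast, List.getD_eq_getElem?_getD, List.getElem?_append_right]

def pvMask (cards : List Int) (k : Int) : List (List Int) :=
  ((List.range (2 ^ cards.length)).filter
      (fun j => decide ((PySem.Chars.count (pvBits' j) ['1'] : Int) = k))).map
    (fun j => pvSel (pvBits' j) cards)

lemma pv_foldl_append_ite {α β : Type} (p : α → Prop) [DecidablePred p] (f : α → β)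
    (l : List α) (acc : List β) :
    l.foldl (fun acc x => if p x then acc ++ [f x] else acc) acc
      = acc ++ (l.filter (fun x => decide (p x))).map f := by
  induction l generalizing acc with
  | nil => simp
  | cons x xs ih =>
    by_cases h : p x <;> simp [h, ih]

lemma pv_foldl_ext {α β : Type} (l : List α) (f g : β → α → β)
    (h : ∀ b a, f b a = g b a) (b : β) : l.foldl f b = l.foldl g b := by
  induction l generalizing b with
  | nil => rfl
  | cons x xs ih => simp only [List.foldl_cons, h, ih]

lemma pvA_eq_mask (cards : List Int) (k : Int) :
    get_all_combinations_for_one_hand_py cards k = pvMask cards k := by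
  unfold get_all_combinations_for_one_hand_py pvMask
  rw [PySem.List.pyRange_one]
  have h2 : ((2 : Int) ^ cards.length - 0).toNat = 2 ^ cards.length := by
    rw [sub_zero, show ((2:Int) ^ cards.length) = ((2 ^ cards.length : Nat) : Int) by push_cast; ring,
      Int.toNat_natCast]
  rw [h2, List.foldl_map]
  have hb : ∀ (acc : List (List Int)) (j : Nat),
      (fun (result : List (List Int)) (i : Int) =>
        let bit_str := PySem.Int.toBinChars i
        if ((PySem.Chars.count bit_str ['1'] : Int) = k) then
          result ++ [(PySem.List.enumerate bit_str.reverse).foldl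
            (fun l p => if p.2 = '1' then l ++ [PySem.List.pyGetD cards p.1 0] else l) []]
        else result) acc ((0 : Int) + (j : Int))
      = if ((PySem.Chars.count (pvBits' j) ['1'] : Int) = k) then
          acc ++ [pvSel (pvBits' j) cards] else acc := by
    intro acc j
    simp only [zero_add, pv_toBinChars_natCast]
    rw [pv_foldl_append_ite (fun p : Int × Char => p.2 = '1')
      (fun p => PySem.List.pyGetD cards p.1 0) _ []]
    rfl
  rw [pv_foldl_ext _ _ _ hb]
  rw [pv_foldl_append_ite (fun j : Nat => ((PySem.Chars.count (pvBits' j) ['1'] : Int) = k))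
    (fun j => pvSel (pvBits' j) cards)]
  simp

lemma pvMask_snoc (ys : List Int) (x : Int) (k : Int) :
    pvMask (ys ++ [x]) k = pvMask ys k ++ (pvMask ys (k - 1)).map (· ++ [x]) := by
  unfold pvMask
  have hlen : (ys ++ [x]).length = ys.length + 1 := by simp
  rw [hlen, pow_succ, mul_two, List.range_add, List.filter_append, List.map_append]
  congr 1
  · apply List.map_congr_left
    intro j hj
    have hj' : j < 2 ^ ys.length := List.mem_range.mp (List.mem_of_mem_filter hj)
    rw [pvSel_bits'_bits, pvSel_bits'_bits, pvSel_snoc_cards _ _ _ (pvBits_len hj')]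
  · rw [List.filter_map, List.map_map]
    rw [List.filter_congr
      (q := fun j => decide ((PySem.Chars.count (pvBits' j) ['1'] : Int) = k - 1)) ?_]
    · rw [List.map_map]
      apply List.map_congr_left
      intro j hj
      have hj' : j < 2 ^ ys.length := List.mem_range.mp (List.mem_of_mem_filter hj)
      simp only [Function.comp_apply]
      rw [pvSel_bits'_bits, pvSel_top' _ _ hj', ← pvSel_bits'_bits]
    · intro j hj
      have hj' : j < 2 ^ ys.length := List.mem_range.mp hj
      simp only [Function.comp_apply, decide_eq_decide]
      rw [pv_count_top hj']
      push_cast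
      constructor <;> intro <;> omega

lemma pvMask_nil (k : Int) : pvMask [] k = if k = 0 then [[]] else [] := by
  unfold pvMask
  have h1 : (2 : Nat) ^ ([] : List Int).length = 1 := by simp
  rw [h1, List.range_one]
  have hc : PySem.Chars.count (pvBits' 0) ['1'] = 0 := by
    rw [pv_count_single]
    simp [pvBits']
  by_cases hk : k = 0
  · subst hk
    have hf : List.filter (fun j => decide ((PySem.Chars.count (pvBits' j) ['1'] : Int) = 0)) [0]
        = [0] := by simp [hc]
    rw [hf]
    simp [pvSel, pvBits', PySem.List.enumerate_cons, PySem.List.enumerate_nil]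
  · simp [hc, hk, Ne.symm hk]

lemma pvGo_zero (rev : List Int) : pvGo rev 0 = [[]] := by
  rw [pvGo.eq_def]
  simp

lemma pvGo_neg (rev : List Int) (k : Int) (hk : k < 0) : pvGo rev k = [] := by
  rw [pvGo.eq_def]
  simp [hk]
  omega

lemma pvMask_eq_go (cards : List Int) : ∀ k : Int, pvMask cards k = pvGo cards.reverse k := by
  induction cards using List.reverseRecOn with
  | nil =>
    intro k
    rw [pvMask_nil, List.reverse_nil, pvGo.eq_def]
    by_cases hk : k = 0
    · simp [hk]
    · by_cases hk' : k < 0 <;> simp [hk, hk']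
  | append_singleton ys x ih =>
    intro k
    rw [pvMask_snoc, ih, ih, List.reverse_append]
    simp only [List.reverse_singleton, List.singleton_append]
    by_cases hk : k = 0
    · subst hk
      rw [pvGo_zero, pvGo_zero, pvGo_neg _ _ (by norm_num)]
      simp
    · by_cases hk' : k < 0
      · rw [pvGo_neg _ _ hk', pvGo_neg _ _ hk', pvGo_neg _ _ (by omega)]
        simp
      · conv_rhs => rw [pvGo.eq_def]
        simp [hk, hk']

-- ===== VERDICT (by name: the statement is the Claim_ definition above) =====
theorem get_all_combinations_for_one_hand_py_spec : Claim_equal_get_all_combinations_for_one_hand_py := by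
  intro cards hand_size _
  show _ = _
  rw [pvA_eq_mask, pvMask_eq_go]
  rfl
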